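-- pv_equiv track=rewrite | github.com/wakamex/rc | src/reservoir/deltanet_replace.py | _unique_top_level
-- ===== SOURCE A (Python) =====
-- def _unique_top_level(paths: list[str]) -> list[str]:
--     """Return only paths with no proper-prefix ancestor also in the list."""
--     path_set = set(paths)
--     seen: set[str] = set()
--     result: list[str] = []
--     for path in paths:
--         parts = path.split(".")
--         dominated = any(
--             ".".join(parts[:k]) in path_set for k in range(1, len(parts))
--         )
--         if not dominated and path not in seen:
--             seen.add(path)
--             result.append(path)
--     return result
-- ===== SOURCE B (Python) =====
-- def _unique_top_level(paths: list[str]) -> list[str]: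
--     """Return only paths with no proper-prefix ancestor also in the list."""
--     uniq = list(dict.fromkeys(paths))
--     return [p for p in uniq if not any(p.startswith(q + ".") for q in uniq)]
-- ===== Notes on version B (the rewrite author's own statement) =====
-- stated objective: simpler
-- what changed: Instead of splitting each path into components and probing every dotted prefix against a hash set, B dedups once with dict.fromkeys and keeps a path iff no other listed path plus '.' is a string prefix of it, inverting the scan (over candidate ancestors instead of over prefixes).
import Mathlib
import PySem

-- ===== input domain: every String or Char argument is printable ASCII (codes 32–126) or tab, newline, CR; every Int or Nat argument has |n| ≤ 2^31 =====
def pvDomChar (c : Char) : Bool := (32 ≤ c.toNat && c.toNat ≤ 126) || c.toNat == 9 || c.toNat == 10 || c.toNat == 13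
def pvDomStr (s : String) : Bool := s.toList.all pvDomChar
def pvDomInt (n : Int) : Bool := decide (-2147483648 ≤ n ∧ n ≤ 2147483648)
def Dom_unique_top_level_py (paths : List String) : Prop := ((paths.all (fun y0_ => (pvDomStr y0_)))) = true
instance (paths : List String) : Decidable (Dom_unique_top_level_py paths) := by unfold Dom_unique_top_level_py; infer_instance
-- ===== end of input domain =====

-- B keeps a path iff no other listed path plus "." is a string prefix of it (scan over candidate
-- ancestors instead of over the path's own dotted prefixes), after a single dict.fromkeys dedup;
-- same return value, simpler decomposition (objective: simpler, no speed claim).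

-- ===== PORT A =====
-- helper: the 'dominated' expression of A's loop body (split into components, probe every proper dotted prefix)
def dominatedA (pathSet : PySem.Set String) (path : String) : Bool :=
  let parts : List String := (PySem.Chars.splitOn path.toList ['.']).map String.ofList
  (PySem.List.pyRange 1 (parts.length)).any
    (fun k => PySem.Set.contains pathSet (PySem.Str.join "." (PySem.List.slice parts none (some k))))

def unique_top_level_py (paths : List String) : List String :=
  let pathSet : PySem.Set String := PySem.Set.ofList paths
  (paths.foldl
    (fun st path =>
      if !(dominatedA pathSet path) && !(PySem.Set.contains st.1 path)
      then (PySem.Set.add st.1 path, st.2 ++ [path]) else st)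
    ((PySem.Set.empty : PySem.Set String), ([] : List String))).2

-- ===== PORT B =====
def unique_top_level_py_alt (paths : List String) : List String :=
  let uniq : List String := PySem.List.dedup paths
  uniq.filter (fun p => !(uniq.any (fun q => PySem.Str.startswith p (q ++ "."))))

-- ===== PRECONDITION & SPEC =====
def Spec_unique_top_level_py (paths : List String) (out : List String) : Prop := out = unique_top_level_py_alt paths
instance (paths : List String) (out : List String) : Decidable (Spec_unique_top_level_py paths out) := by unfold Spec_unique_top_level_py; infer_instance

-- ===== CLAIM (what is proved, stated in full; the proofs are below) =====
def Claim_equal_unique_top_level_py : Prop := ∀ (paths : List String), Dom_unique_top_level_py paths → Spec_unique_top_level_py paths (unique_top_level_py paths)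

-- ===== LEMMAS AND PROOFS =====

-- a clean structural model of PySem.Chars.splitOn on the single-char separator '.'
def spChars : List Char → List (List Char)
  | [] => [[]]
  | c :: rest => if c = '.' then [] :: spChars rest else (spChars rest).modifyHead (c :: ·)

theorem spChars_length_pos (cs : List Char) : 0 < (spChars cs).length := by
  induction cs with
  | nil => simp [spChars]
  | cons c rest ih => simp only [spChars]; split <;> simp [List.length_modifyHead]; omega

theorem splitOn_go_eq (fuel : Nat) (l cur : List Char) (acc : List (List Char))
    (h : l.length < fuel) :
    PySem.Chars.splitOn.go ['.'] fuel l cur acc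
      = acc.reverse ++ (spChars l).modifyHead (cur.reverse ++ ·) := by
  induction fuel generalizing l cur acc with
  | zero => omega
  | succ fuel ih =>
    cases l with
    | nil => simp [PySem.Chars.splitOn.go, spChars]
    | cons c rest =>
      by_cases hc : c = '.'
      · subst hc
        rw [show PySem.Chars.splitOn.go ['.'] (fuel+1) ('.' :: rest) cur acc
              = PySem.Chars.splitOn.go ['.'] fuel rest [] (cur.reverse :: acc) from by
          simp [PySem.Chars.splitOn.go, List.isPrefixOf]]
        rw [ih _ _ _ (by simpa using h)]
        have hid : List.modifyHead (fun x : List Char => x) (spChars rest) = spChars rest := by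
          cases spChars rest <;> simp [List.modifyHead]
        simp [spChars, hid]
      · rw [show PySem.Chars.splitOn.go ['.'] (fuel+1) (c :: rest) cur acc
              = PySem.Chars.splitOn.go ['.'] fuel rest (c :: cur) acc from by
          simp [PySem.Chars.splitOn.go, List.isPrefixOf]
          intro h'; exact absurd h'.symm hc]
        rw [ih _ _ _ (by simpa using h)]
        simp only [spChars, if_neg hc, List.modifyHead_modifyHead]
        have hfg : (fun x : List Char => (c :: cur).reverse ++ x)
            = ((fun x : List Char => cur.reverse ++ x) ∘ fun x : List Char => c :: x) := by
          funext x; simp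
        rw [hfg]

theorem splitOn_eq_spChars (cs : List Char) :
    PySem.Chars.splitOn cs ['.'] = spChars cs := by
  unfold PySem.Chars.splitOn
  rw [splitOn_go_eq _ _ _ _ (by omega)]
  cases h : spChars cs <;> simp [List.modifyHead]

theorem join_take_cons (c : Char) (h : List Char) (t : List (List Char)) (k : Nat) (hk : 1 ≤ k) :
    PySem.Chars.join ['.'] (((c :: h) :: t).take k) = c :: PySem.Chars.join ['.'] ((h :: t).take k) := by
  obtain ⟨k', rfl⟩ : ∃ k', k = k' + 1 := ⟨k - 1, by omega⟩
  simp only [List.take_succ_cons]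
  cases ht : t.take k' with
  | nil => simp [PySem.Chars.join_singleton]
  | cons a as => simp [PySem.Chars.join_cons_cons]

theorem key_prefix (cs : List Char) : ∀ (ts : List Char),
    (∃ k : Nat, 1 ≤ k ∧ k < (spChars cs).length ∧
        PySem.Chars.join ['.'] ((spChars cs).take k) = ts)
      ↔ (ts ++ ['.']) <+: cs := by
  induction cs with
  | nil =>
    intro ts
    constructor
    · rintro ⟨k, h1, h2, -⟩
      simp [spChars] at h2
      omega
    · intro h
      have := h.length_le
      simp at this
  | cons c rest ih =>
    intro ts
    by_cases hc : c = '.'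
    · subst hc
      have hsp : spChars ('.' :: rest) = [] :: spChars rest := by simp [spChars]
      rw [hsp]
      constructor
      · rintro ⟨k, h1, h2, hj⟩
        by_cases hk1 : k = 1
        · subst hk1
          simp [PySem.Chars.join_singleton] at hj
          subst hj
          simp [List.cons_prefix_cons]
        · obtain ⟨m, rfl⟩ : ∃ m, k = m + 1 := ⟨1 - 1 + (k - 1), by omega⟩
          have hm1 : 1 ≤ m := by omega
          have hm2 : m < (spChars rest).length := by simp at h2; omega
          cases hS : spChars rest with
          | nil => exact absurd (spChars_length_pos rest) (by simp [hS])
          | cons s0 S' =>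
            obtain ⟨m', rfl⟩ : ∃ m', m = m' + 1 := ⟨m - 1, by omega⟩
            rw [hS] at hj
            simp only [List.take_succ_cons, PySem.Chars.join_cons_cons, List.nil_append] at hj
            have hpre : (PySem.Chars.join ['.'] ((spChars rest).take (m' + 1)) ++ ['.']) <+: rest :=
              (ih _).mp ⟨m' + 1, hm1, hm2, rfl⟩
            rw [hS] at hpre
            simp only [List.take_succ_cons] at hpre
            rw [← hj]
            simpa [List.cons_prefix_cons] using hpre
      · intro hpre
        cases ts with
        | nil =>
          refine ⟨1, le_refl 1, by simpa using spChars_length_pos rest, by simp [PySem.Chars.join_singleton]⟩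
        | cons t0 ts' =>
          rw [List.cons_append, List.cons_prefix_cons] at hpre
          obtain ⟨ht0, hpre'⟩ := hpre
          obtain ⟨k, h1, h2, hj⟩ := (ih ts').mpr hpre'
          refine ⟨k + 1, by omega, by simpa using h2, ?_⟩
          cases hS : spChars rest with
          | nil => exact absurd (spChars_length_pos rest) (by simp [hS])
          | cons s0 S' =>
            obtain ⟨m, rfl⟩ : ∃ m, k = m + 1 := ⟨k - 1, by omega⟩
            rw [hS] at hj
            simp only [List.take_succ_cons] at hj
            simp only [List.take_succ_cons, PySem.Chars.join_cons_cons, List.nil_append]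
            rw [hj, ht0]
            rfl
    · cases hS : spChars rest with
      | nil => exact absurd (spChars_length_pos rest) (by simp [hS])
      | cons s0 S' =>
        have hsp : spChars (c :: rest) = (c :: s0) :: S' := by
          simp [spChars, hc, hS, List.modifyHead]
        rw [hsp]
        constructor
        · rintro ⟨k, h1, h2, hj⟩
          rw [join_take_cons c s0 S' k h1] at hj
          have h2' : k < (spChars rest).length := by rw [hS]; simpa using h2
          have hpre : (PySem.Chars.join ['.'] ((spChars rest).take k) ++ ['.']) <+: rest :=
            (ih _).mp ⟨k, h1, h2', rfl⟩
          rw [hS] at hpre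
          rw [← hj]
          simpa [List.cons_prefix_cons] using hpre
        · intro hpre
          cases ts with
          | nil =>
            rw [List.nil_append, List.cons_prefix_cons] at hpre
            exact absurd hpre.1.symm hc
          | cons t0 ts' =>
            rw [List.cons_append, List.cons_prefix_cons] at hpre
            obtain ⟨ht0, hpre'⟩ := hpre
            obtain ⟨k, h1, h2, hj⟩ := (ih ts').mpr hpre'
            refine ⟨k, h1, by rw [hS] at h2; simpa using h2, ?_⟩
            rw [join_take_cons c s0 S' k h1]
            rw [hS] at hj
            rw [hj, ht0]

theorem strJoin_map_ofList (xs : List (List Char)) :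
    PySem.Str.join "." (xs.map String.ofList) = String.ofList (PySem.Chars.join ['.'] xs) := by
  simp [PySem.Str.join, List.map_map, Function.comp_def, String.toList_ofList,
    show ".".toList = ['.'] from by decide]

theorem dominated_eq (paths : List String) (p : String) :
    dominatedA (PySem.Set.ofList paths) p
      = (PySem.List.dedup paths).any (fun q => PySem.Str.startswith p (q ++ ".")) := by
  have hdot : ".".toList = ['.'] := by decide
  rw [Bool.eq_iff_iff]
  simp only [dominatedA, splitOn_eq_spChars, List.any_eq_true, PySem.List.mem_pyRange_one,
    List.length_map]
  constructor
  · rintro ⟨k, ⟨hk1, hk2⟩, hcont⟩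
    rw [PySem.List.slice_to _ (by omega), ← List.map_take, strJoin_map_ofList] at hcont
    have hqmem : String.ofList (PySem.Chars.join ['.'] ((spChars p.toList).take k.toNat)) ∈ paths := by
      rw [PySem.Set.contains, List.contains_iff_mem] at hcont
      exact (PySem.Set.mem_ofList _ _).mp hcont
    have hkey : (PySem.Chars.join ['.'] ((spChars p.toList).take k.toNat) ++ ['.']) <+: p.toList :=
      (key_prefix p.toList _).mp ⟨k.toNat, by omega, by omega, rfl⟩
    refine ⟨String.ofList (PySem.Chars.join ['.'] ((spChars p.toList).take k.toNat)), ?_, ?_⟩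
    · rw [PySem.List.dedup_eq_ofList]
      exact (PySem.Set.mem_ofList _ _).mpr hqmem
    · rw [PySem.Str.startswith_eq, PySem.Chars.startswith_iff, String.toList_append, hdot,
        String.toList_ofList]
      exact hkey
  · rintro ⟨q, hqmem, hsw⟩
    have hq : q ∈ paths := by
      rw [PySem.List.dedup_eq_ofList] at hqmem
      exact (PySem.Set.mem_ofList _ _).mp hqmem
    rw [PySem.Str.startswith_eq, PySem.Chars.startswith_iff, String.toList_append, hdot] at hsw
    obtain ⟨k, hk1, hk2, hj⟩ := (key_prefix p.toList q.toList).mpr hsw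
    refine ⟨(k : Int), ⟨by exact_mod_cast hk1, by exact_mod_cast hk2⟩, ?_⟩
    rw [PySem.List.slice_to _ (by positivity), Int.toNat_natCast, ← List.map_take,
      strJoin_map_ofList, hj]
    rw [PySem.Set.contains, List.contains_iff_mem]
    exact (PySem.Set.mem_ofList _ _).mpr (by rw [String.ofList_toList]; exact hq)

-- what A's loop appends: the not-yet-seen, non-dominated paths (seen grows only with kept paths)
def fsee (dom : String → Bool) : PySem.Set String → List String → List String
  | _, [] => []
  | s, p :: l =>
    if !(dom p) && !(PySem.Set.contains s p) then p :: fsee dom (PySem.Set.add s p) l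
    else fsee dom s l

-- plain first-occurrence dedup with an explicit seen set
def dsee : PySem.Set String → List String → List String
  | _, [] => []
  | s, p :: l => if PySem.Set.contains s p then dsee s l else p :: dsee (PySem.Set.add s p) l

theorem foldA_eq (dom : String → Bool) (l : List String) :
    ∀ (s : PySem.Set String) (r : List String),
    (l.foldl (fun st p => if !(dom p) && !(PySem.Set.contains st.1 p)
        then (PySem.Set.add st.1 p, st.2 ++ [p]) else st) (s, r)).2 = r ++ fsee dom s l := by
  induction l with
  | nil => intro s r; simp [fsee]
  | cons p l ih =>
    intro s r
    simp only [List.foldl_cons, fsee]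
    by_cases h : (!(dom p) && !(PySem.Set.contains s p)) = true
    · simp only [h, if_true, ih]
      simp
    · simp only [h, ih]
      simp at h
      simp

theorem contains_add (s : PySem.Set String) (x y : String) :
    PySem.Set.contains (PySem.Set.add s x) y = (PySem.Set.contains s y || y == x) := by
  by_cases hxy : y = x
  · subst hxy
    by_cases h : PySem.Set.contains s y = true
    · simp [PySem.Set.add, List.contains_iff_mem.mp h]
    · have h' : PySem.Set.contains s y = false := by simpa using h
      rw [h', Bool.false_or, beq_self_eq_true]
      simp only [PySem.Set.add, h', Bool.false_eq_true, if_false]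
      rw [Bool.eq_iff_iff]
      simp [PySem.Set.contains]
  · have hbe : (y == x) = false := by simpa using hxy
    rw [hbe, Bool.or_false]
    simp only [PySem.Set.add]
    split
    · rfl
    · rw [Bool.eq_iff_iff]
      simp [PySem.Set.contains, hxy]

theorem fsee_eq (dom : String → Bool) (l : List String) :
    ∀ (s t : PySem.Set String),
    (∀ x ∈ l, dom x = false → PySem.Set.contains s x = PySem.Set.contains t x) →
    fsee dom s l = (dsee t l).filter (fun p => !(dom p)) := by
  induction l with
  | nil => intro s t _; simp [fsee, dsee]
  | cons p l ih =>
    intro s t hst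
    have htail : ∀ x ∈ l, dom x = false → PySem.Set.contains s x = PySem.Set.contains t x :=
      fun x hx h => hst x (List.mem_cons_of_mem _ hx) h
    by_cases hd : dom p = true
    · by_cases hc : PySem.Set.contains t p = true
      · simp only [fsee, dsee, hd, hc, Bool.not_true, Bool.false_and, Bool.false_eq_true,
          if_false, if_true]
        exact ih s t htail
      · simp only [fsee, dsee, hd, hc, Bool.not_true, Bool.false_and, Bool.false_eq_true,
          if_false, List.filter_cons]
        exact ih s (PySem.Set.add t p) (fun x hx h => by
          rw [contains_add]
          have hxp : (x == p) = false := by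
            by_cases hxp : x = p
            · subst hxp; rw [h] at hd; exact absurd hd (by simp)
            · simp [hxp]
          rw [hxp, Bool.or_false]
          exact htail x hx h)
    · have hd' : dom p = false := by simpa using hd
      have hsp : PySem.Set.contains s p = PySem.Set.contains t p :=
        hst p (List.mem_cons_self) hd'
      by_cases hc : PySem.Set.contains t p = true
      · simp only [fsee, dsee, hd', hsp, hc, Bool.not_true, Bool.and_false, Bool.false_eq_true,
          if_false, if_true]
        exact ih s t htail
      · have hc' : PySem.Set.contains t p = false := by simpa using hc
        simp only [fsee, dsee, hd', hsp, hc', Bool.not_false, Bool.true_and, Bool.false_eq_true,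
          if_false, if_true, List.filter_cons]
        rw [ih (PySem.Set.add s p) (PySem.Set.add t p) (fun x hx h => by
          rw [contains_add, contains_add, htail x hx h])]

theorem dsee_eq (l : List String) : ∀ (s : PySem.Set String),
    s ++ dsee s l = l.foldl PySem.Set.add s := by
  induction l with
  | nil => intro s; simp [dsee]
  | cons p l ih =>
    intro s
    simp only [dsee, List.foldl_cons]
    by_cases hc : PySem.Set.contains s p = true
    · have hadd : PySem.Set.add s p = s := by simp [PySem.Set.add, List.contains_iff_mem.mp hc]
      simp only [hc, if_true, hadd]
      exact ih s
    · have hc' : PySem.Set.contains s p = false := by simpa using hc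
      have hns : p ∉ s := fun hm => hc (List.contains_iff_mem.mpr hm)
      have hadd : PySem.Set.add s p = s ++ [p] := by
        simp [PySem.Set.add, hns]
      simp only [hc']
      rw [← ih (PySem.Set.add s p), hadd]
      simp

theorem dsee_empty (l : List String) : dsee PySem.Set.empty l = PySem.List.dedup l := by
  have h := dsee_eq l PySem.Set.empty
  rw [PySem.List.dedup_eq_ofList, PySem.Set.ofList_eq_foldl]
  simpa [PySem.Set.empty] using h

-- ===== VERDICT =====
theorem unique_top_level_py_spec : Claim_equal_unique_top_level_py := by
  intro paths _
  unfold Spec_unique_top_level_py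
  show unique_top_level_py paths = unique_top_level_py_alt paths
  simp only [unique_top_level_py, unique_top_level_py_alt]
  rw [foldA_eq (dominatedA (PySem.Set.ofList paths)) paths PySem.Set.empty []]
  rw [fsee_eq _ paths PySem.Set.empty PySem.Set.empty (fun _ _ _ => rfl)]
  rw [dsee_empty]
  simp only [List.nil_append]
  exact List.filter_congr (fun p _ => by rw [dominated_eq])
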